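-- pv_equiv track=rewrite | github.com/Dayvis-0/Repaso-PYTHON-Universidad | IIAD45-personal/04/Practica/SumaBinaria.py | suma_bina
-- ===== SOURCE A (Python) =====
-- def suma_bina(S, start, stop):
--     if start >= stop:
--         return 0
--     elif start == stop-1:
--         return S[start]
--     else:
--         mid = (start+stop)//2
--
--         return suma_bina(S, start, mid) + suma_bina(S, mid, stop)
-- ===== SOURCE B (Python) =====
-- def suma_bina(S, start, stop):
--     total = 0
--     for i in range(start, stop):
--         total += S[i]
--     return total
-- ===== Notes on version B (the rewrite author's own statement) =====
-- stated objective: simpler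
-- what changed: Replaces the divide-and-conquer recursion with a single iterative accumulator loop over range(start, stop), indexing S[i] directly so negative-index semantics are preserved.
-- outside the precondition, e.g. on suma_bina([1, 2], 0, 5): A raises IndexError, B raises IndexError
import Mathlib
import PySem

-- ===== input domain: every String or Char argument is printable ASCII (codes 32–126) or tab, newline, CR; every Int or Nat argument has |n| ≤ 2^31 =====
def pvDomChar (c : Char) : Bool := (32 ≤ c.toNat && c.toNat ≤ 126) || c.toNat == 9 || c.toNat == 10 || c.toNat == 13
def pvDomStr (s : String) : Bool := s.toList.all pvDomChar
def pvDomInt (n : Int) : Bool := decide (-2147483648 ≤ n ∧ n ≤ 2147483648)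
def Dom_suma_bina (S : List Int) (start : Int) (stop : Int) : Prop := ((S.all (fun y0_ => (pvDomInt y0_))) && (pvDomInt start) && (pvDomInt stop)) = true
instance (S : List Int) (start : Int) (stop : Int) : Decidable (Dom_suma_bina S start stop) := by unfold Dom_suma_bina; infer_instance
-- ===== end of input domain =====

-- B replaces the divide-and-conquer recursion by one iterative accumulator loop
-- over range(start, stop) (objective: simpler).

-- ===== PORT A =====
def suma_bina (S : List Int) (start : Int) (stop : Int) : Int :=
  if start ≥ stop then 0
  else if start = stop - 1 then (PySem.List.pyGet? S start).getD 0
  else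
    let mid := PySem.Int.floordiv (start + stop) 2
    suma_bina S start mid + suma_bina S mid stop
termination_by (stop - start).toNat
decreasing_by
  all_goals
    simp only [PySem.Int.floordiv_eq_ediv_of_pos (a := start + stop) (by omega : (0:Int) < 2)]
    omega

-- ===== PORT B =====
def suma_bina_alt (S : List Int) (start : Int) (stop : Int) : Int :=
  (PySem.List.pyRange start stop 1).foldl
    (fun total i => total + (PySem.List.pyGet? S i).getD 0) 0

-- ===== PRECONDITION & SPEC =====
-- Pre_ excludes exactly the inputs where Python A raises IndexError: start < stop
-- with some accessed index start..stop-1 out of range (B raises there too).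
def Pre_suma_bina (S : List Int) (start : Int) (stop : Int) : Prop :=
  stop ≤ start ∨ (-(S.length : Int) ≤ start ∧ stop ≤ (S.length : Int))
instance (S : List Int) (start : Int) (stop : Int) : Decidable (Pre_suma_bina S start stop) := by
  unfold Pre_suma_bina; infer_instance

def pvWitness_suma_bina : List Int × Int × Int := ([3, -1, 4, 1, 5], 1, 4)

def Spec_suma_bina (S : List Int) (start : Int) (stop : Int) (out : Int) : Prop := out = suma_bina_alt S start stop
instance (S : List Int) (start : Int) (stop : Int) (out : Int) : Decidable (Spec_suma_bina S start stop out) := by unfold Spec_suma_bina; infer_instance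

-- ===== CLAIM (what is proved, stated in full; the proofs are below) =====
def Claim_equal_suma_bina : Prop := ∀ (S : List Int) (start : Int) (stop : Int), Dom_suma_bina S start stop → Pre_suma_bina S start stop → Spec_suma_bina S start stop (suma_bina S start stop)

-- ===== LEMMAS AND PROOFS =====

-- B as a sum over the range of fetched elements
theorem suma_bina_alt_eq_sum (S : List Int) (start stop : Int) :
    suma_bina_alt S start stop
      = ((PySem.List.pyRange start stop 1).map
          (fun i => (PySem.List.pyGet? S i).getD 0)).sum := by
  unfold suma_bina_alt
  rw [PySem.List.foldl_add]
  simp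

-- A computes the same sum, by strong induction on the interval length
theorem suma_bina_eq_sum (S : List Int) (start stop : Int) :
    suma_bina S start stop
      = ((PySem.List.pyRange start stop 1).map
          (fun i => (PySem.List.pyGet? S i).getD 0)).sum := by
  generalize hn : (stop - start).toNat = n
  induction n using Nat.strong_induction_on generalizing start stop with
  | _ n ih =>
    rw [suma_bina]
    by_cases h1 : start ≥ stop
    · simp [h1, PySem.List.pyRange_one_eq_nil h1]
    · by_cases h2 : start = stop - 1
      · simp only [h1, h2, if_false, if_true, ge_iff_le, le_refl, ite_true]
        rw [PySem.List.pyRange_one_cons (show stop - 1 < stop by omega),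
            PySem.List.pyRange_one_eq_nil (show stop ≤ stop - 1 + 1 by omega)]
        simp
      · have hmid := PySem.Int.floordiv_eq_ediv_of_pos
          (a := start + stop) (by omega : (0:Int) < 2)
        have hb1 : start < PySem.Int.floordiv (start + stop) 2 := by
          rw [hmid]; omega
        have hb2 : PySem.Int.floordiv (start + stop) 2 < stop := by
          rw [hmid]; omega
        simp only [h1, h2, if_false]
        rw [ih ((PySem.Int.floordiv (start + stop) 2) - start).toNat
              (by omega) start _ rfl,
            ih (stop - (PySem.Int.floordiv (start + stop) 2)).toNat
              (by omega) _ stop rfl,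
            PySem.List.pyRange_one_append start (PySem.Int.floordiv (start + stop) 2) stop
              (by omega) (by omega)]
        simp

-- ===== VERDICT (by name: the statement is the Claim_ definition above) =====
theorem suma_bina_spec : Claim_equal_suma_bina := by
  intro S start stop _ _
  unfold Spec_suma_bina
  rw [suma_bina_eq_sum, suma_bina_alt_eq_sum]
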